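-- pv_equiv track=rewrite | github.com/hwhyeons/Baekjoon | 백준/Gold/17255. N으로 만들기/N으로 만들기.py | dfs
-- ===== SOURCE A (Python) =====
-- d: dict[str,int] = dict()
--
-- def dfs(s: str):
--     if s in d:
--         return d[s]
--     if len(s) == 1:
--         return 1
--     left_remove_str = s[1:]
--     right_remove_str = s[:-1]
--     left_remove_answer = dfs(left_remove_str)
--     if left_remove_str == right_remove_str:
--         right_remove_answer = 0
--     else:
--         right_remove_answer = dfs(right_remove_str)
--     d[s] = left_remove_answer+right_remove_answer
--     return left_remove_answer+right_remove_answer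
-- ===== SOURCE B (Python) =====
-- def dfs(s):
--     # Bottom-up DP over window lengths with two rolling arrays:
--     # prev[i] = number of build paths for the window s[i:i+L],
--     # uni[i]  = whether that window consists of one repeated character.
--     n = len(s)
--     prev = [1] * n
--     uni = [True] * n
--     for L in range(2, n + 1):
--         m = n - L + 1
--         uni = [uni[i + 1] and s[i] == s[i + 1] for i in range(m)]
--         prev = [1 if uni[i] else prev[i + 1] + prev[i] for i in range(m)]
--     return prev[0]
-- ===== Notes on version B (the rewrite author's own statement) =====
-- stated objective: faster
-- what changed: Top-down recursion memoised in a global dict keyed by string slices is replaced by a bottom-up index DP over window lengths with two rolling arrays (counts and an all-equal flag), eliminating all slicing and hashing; Pre_ excludes only the empty string, on which A recurses forever (RecursionError).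
import Mathlib
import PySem

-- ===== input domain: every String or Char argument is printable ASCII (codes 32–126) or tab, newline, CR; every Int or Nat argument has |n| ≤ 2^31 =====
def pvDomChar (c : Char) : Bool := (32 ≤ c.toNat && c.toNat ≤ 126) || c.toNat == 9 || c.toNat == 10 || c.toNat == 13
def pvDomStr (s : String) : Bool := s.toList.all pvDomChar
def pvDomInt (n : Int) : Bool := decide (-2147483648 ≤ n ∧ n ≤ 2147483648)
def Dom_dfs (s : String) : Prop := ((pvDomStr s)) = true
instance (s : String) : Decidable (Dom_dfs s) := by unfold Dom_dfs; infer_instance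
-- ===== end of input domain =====

-- B replaces A's string-keyed memoised recursion by a bottom-up index DP with two rolling arrays (asymptotically faster; return value only — Python A also fills a global memo dict).

-- ===== PORT A =====
-- A's recursion with the memo dict threaded through (the Python dict is global; each call of `dfs` below starts it empty, which yields the same values)
def dfsA (s : List Char) (d : PySem.Dict String Int) : Int × PySem.Dict String Int :=
  match d.get? (String.ofList s) with
  | some v => (v, d)
  | none =>
    if s.length = 1 then (1, d)
    else if _h0 : s.length < 2 then (0, d)  -- s = "": Python recurses forever (RecursionError); excluded by Pre_
    else
      let l := s.tail
      let r := s.dropLast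
      let resL := dfsA l d
      let resR := if l = r then ((0 : Int), resL.2) else dfsA r resL.2
      let sum := resL.1 + resR.1
      (sum, resR.2.insert (String.ofList s) sum)
termination_by s.length
decreasing_by
  · simp only [List.length_tail]; omega
  · simp only [List.length_dropLast]; omega

def dfs (s : String) : Int := (dfsA s.toList PySem.Dict.empty).1

-- ===== PORT B =====
-- one iteration of B's loop: from (prev, uni) for windows of length L-1 to windows of length L
-- (list indexing in Source B is always in range; ported with getD whose default is never read)
def dfsStep (cs : List Char) (n : Nat) (st : List Int × List Bool) (L : Nat) :
    List Int × List Bool :=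
  let m := n - L + 1
  let uni := (List.range m).map
    (fun i => st.2.getD (i + 1) false && decide (cs.getD i ' ' = cs.getD (i + 1) ' '))
  let prev := (List.range m).map
    (fun i => if uni.getD i false then (1 : Int) else st.1.getD (i + 1) 0 + st.1.getD i 0)
  (prev, uni)

def dfs_alt (s : String) : Int :=
  let cs := s.toList
  let n := cs.length
  let init := (List.replicate n (1 : Int), List.replicate n true)
  let fin := (List.range' 2 (n - 1)).foldl (dfsStep cs n) init   -- L = 2, …, n
  fin.1.getD 0 0

-- ===== PRECONDITION & SPEC =====
-- Pre_ excludes only the empty string, on which Python A recurses forever (RecursionError).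
def Pre_dfs (s : String) : Prop := s ≠ ""
instance (s : String) : Decidable (Pre_dfs s) := by unfold Pre_dfs; infer_instance
def pvWitness_dfs : String := "aab"

def Spec_dfs (s : String) (out : Int) : Prop := out = dfs_alt s
instance (s : String) (out : Int) : Decidable (Spec_dfs s out) := by unfold Spec_dfs; infer_instance

-- ===== CLAIM (what is proved, stated in full; the proofs are below) =====
def Claim_equal_dfs : Prop := ∀ (s : String), Dom_dfs s → Pre_dfs s → Spec_dfs s (dfs s)

-- ===== LEMMAS AND PROOFS =====

-- the recurrence both programs compute
def pvF (cs : List Char) : Int :=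
  if cs.length ≤ 1 then 1
  else pvF cs.tail + (if cs.tail = cs.dropLast then 0 else pvF cs.dropLast)
termination_by cs.length
decreasing_by
  · simp only [List.length_tail]; omega
  · simp only [List.length_dropLast]; omega

-- "tail = dropLast" (A's all-equal test) decomposes one character at a time (B's uni recurrence)
theorem uni_cons (a b : Char) (t : List Char) :
    ((a :: b :: t).tail = (a :: b :: t).dropLast) ↔
      (a = b ∧ (b :: t).tail = (b :: t).dropLast) := by
  simp only [List.tail_cons, List.dropLast_cons₂, List.cons.injEq]
  constructor
  · rintro ⟨h1, h2⟩; exact ⟨h1.symm, h2⟩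
  · rintro ⟨h1, h2⟩; exact ⟨h1.symm, h2⟩

theorem pvF_uniform : ∀ (cs : List Char), cs.tail = cs.dropLast → pvF cs = 1
  | [], _ => by rw [pvF]; simp
  | [_], _ => by rw [pvF]; simp
  | a :: b :: t, h => by
    have h' := (uni_cons a b t).1 h
    have ih := pvF_uniform (b :: t) h'.2
    rw [pvF, if_neg (by simp), if_pos h]
    simp only [List.tail_cons]
    rw [ih]
    norm_num

-- ===== Part A: the memoised recursion computes pvF =====

def MemoOK (d : PySem.Dict String Int) : Prop :=
  ∀ k v, d.get? k = some v → v = pvF k.toList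

theorem dfsA_correct : ∀ (s : List Char) (d : PySem.Dict String Int),
    s ≠ [] → MemoOK d → (dfsA s d).1 = pvF s ∧ MemoOK (dfsA s d).2
  | s, d, hne, hok => by
    rw [dfsA]
    split
    · next v hget =>
      refine ⟨?_, hok⟩
      have := hok _ _ hget
      rwa [String.toList_ofList] at this
    · next hget =>
      split_ifs with h1 h0
      · refine ⟨?_, hok⟩
        rw [pvF, if_pos (by omega)]
      · exact absurd (List.length_eq_zero_iff.1 (by omega)) hne
      · have hlen : 2 ≤ s.length := by omega
        have htne : s.tail ≠ [] := by
          intro h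
          have ht : s.tail.length = s.length - 1 := List.length_tail
          rw [h] at ht; simp at ht; omega
        have hrne : s.dropLast ≠ [] := by
          intro h
          have ht : s.dropLast.length = s.length - 1 := List.length_dropLast
          rw [h] at ht; simp at ht; omega
        obtain ⟨ih1, ih2⟩ := dfsA_correct s.tail d htne hok
        by_cases heq : s.tail = s.dropLast
        · simp only [if_pos heq]
          have hval : (dfsA s.tail d).1 + 0 = pvF s := by
            rw [pvF, if_neg (by omega), if_pos heq, ih1]
          refine ⟨hval, ?_⟩
          intro k v hk
          by_cases hks : k = String.ofList s
          · subst hks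
            rw [PySem.Dict.get?_insert_self] at hk
            injection hk with h
            rw [← h, hval, String.toList_ofList]
          · rw [PySem.Dict.get?_insert_of_ne _ _ hks] at hk
            exact ih2 _ _ hk
        · simp only [if_neg heq]
          obtain ⟨ih3, ih4⟩ := dfsA_correct s.dropLast (dfsA s.tail d).2 hrne ih2
          have hval : (dfsA s.tail d).1 + (dfsA s.dropLast (dfsA s.tail d).2).1 = pvF s := by
            rw [pvF, if_neg (by omega), if_neg heq, ih1, ih3]
          refine ⟨hval, ?_⟩
          intro k v hk
          by_cases hks : k = String.ofList s
          · subst hks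
            rw [PySem.Dict.get?_insert_self] at hk
            injection hk with h
            rw [← h, hval, String.toList_ofList]
          · rw [PySem.Dict.get?_insert_of_ne _ _ hks] at hk
            exact ih4 _ _ hk
termination_by s => s.length
decreasing_by
  · simp only [List.length_tail]; omega
  · simp only [List.length_dropLast]; omega

-- ===== Part B: the rolling DP computes pvF on every window =====

-- the window s[i : i+L]
def pvSub (cs : List Char) (i L : Nat) : List Char := (cs.drop i).take L

theorem pvSub_length (cs : List Char) (i L : Nat) (h : i + L ≤ cs.length) :
    (pvSub cs i L).length = L := by
  simp [pvSub]; omega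

theorem tail_take' (xs : List Char) (L : Nat) :
    (List.take L xs).tail = List.take (L - 1) xs.tail := by
  cases xs <;> cases L <;> simp

theorem pvSub_tail (cs : List Char) (i L : Nat) :
    (pvSub cs i L).tail = pvSub cs (i + 1) (L - 1) := by
  rw [pvSub, tail_take', List.tail_drop]; rfl

theorem pvSub_dropLast (cs : List Char) (i L : Nat) (h : i + L ≤ cs.length) :
    (pvSub cs i L).dropLast = pvSub cs i (L - 1) := by
  have h' : L ≤ (cs.drop i).length := by simp; omega
  rw [pvSub, pvSub, List.dropLast_eq_take, List.take_take, List.length_take]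
  congr 1
  omega

theorem pvSub_cons (cs : List Char) (i L : Nat) (h : i < cs.length) (hL : 1 ≤ L) :
    pvSub cs i L = cs.getD i ' ' :: pvSub cs (i + 1) (L - 1) := by
  have hd : cs.drop i = cs.getD i ' ' :: cs.drop (i + 1) := by
    rw [List.getD_eq_getElem _ _ h, List.drop_eq_getElem_cons h]
  cases L with
  | zero => omega
  | succ L' => rw [pvSub, hd]; simp [pvSub]

-- the state of B's loop after processing window lengths 2..L
def pvState (cs : List Char) (n L : Nat) : List Int × List Bool :=
  ((List.range (n - L + 1)).map (fun i => pvF (pvSub cs i L)),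
   (List.range (n - L + 1)).map
     (fun i => decide ((pvSub cs i L).tail = (pvSub cs i L).dropLast)))

theorem getD_map_range {α : Type} (f : Nat → α) (m i : Nat) (d : α) (h : i < m) :
    ((List.range m).map f).getD i d = f i := by
  rw [List.getD_eq_getElem _ _ (by simpa using h)]
  simp

theorem dfsStep_state (cs : List Char) (L : Nat) (h2 : 2 ≤ L) (hL : L ≤ cs.length) :
    dfsStep cs cs.length (pvState cs cs.length (L - 1)) L = pvState cs cs.length L := by
  have huni : ((List.range (cs.length - L + 1)).map
      (fun i => (pvState cs cs.length (L - 1)).2.getD (i + 1) false &&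
        decide (cs.getD i ' ' = cs.getD (i + 1) ' '))) =
      (List.range (cs.length - L + 1)).map
        (fun i => decide ((pvSub cs i L).tail = (pvSub cs i L).dropLast)) := by
    apply List.map_congr_left
    intro i hi
    rw [List.mem_range] at hi
    have hgd : (pvState cs cs.length (L - 1)).2.getD (i + 1) false =
        decide ((pvSub cs (i + 1) (L - 1)).tail = (pvSub cs (i + 1) (L - 1)).dropLast) := by
      rw [pvState]
      exact getD_map_range _ _ _ _ (by omega)
    rw [hgd]
    have hcons : pvSub cs i L = cs.getD i ' ' :: pvSub cs (i + 1) (L - 1) :=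
      pvSub_cons cs i L (by omega) (by omega)
    have hcons2 : pvSub cs (i + 1) (L - 1) =
        cs.getD (i + 1) ' ' :: pvSub cs (i + 2) (L - 2) := by
      have h3 := pvSub_cons cs (i + 1) (L - 1) (by omega) (by omega)
      have h4 : L - 1 - 1 = L - 2 := by omega
      rwa [h4] at h3
    rw [hcons, hcons2]
    simp [Bool.and_comm, eq_comm]
  rw [dfsStep]
  rw [huni]
  conv_rhs => rw [pvState]
  simp only [Prod.mk.injEq, and_true]
  apply List.map_congr_left
  intro i hi
  rw [List.mem_range] at hi
  rw [getD_map_range _ _ _ _ hi]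
  have hsub : i + L ≤ cs.length := by omega
  have hlen : (pvSub cs i L).length = L := pvSub_length cs i L hsub
  by_cases hch : (pvSub cs i L).tail = (pvSub cs i L).dropLast
  · rw [if_pos (by simp [hch])]
    exact (pvF_uniform _ hch).symm
  · rw [if_neg (by simp [hch])]
    have hgd1 : (pvState cs cs.length (L - 1)).1.getD (i + 1) 0 =
        pvF (pvSub cs (i + 1) (L - 1)) := by
      rw [pvState]
      exact getD_map_range _ _ _ _ (by omega)
    have hgd0 : (pvState cs cs.length (L - 1)).1.getD i 0 = pvF (pvSub cs i (L - 1)) := by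
      rw [pvState]
      exact getD_map_range _ _ _ _ (by omega)
    have hF : pvF (pvSub cs i L) = pvF (pvSub cs (i + 1) (L - 1)) + pvF (pvSub cs i (L - 1)) := by
      rw [pvF, if_neg (by omega), if_neg hch, pvSub_tail, pvSub_dropLast cs i L hsub]
    rw [hgd1, hgd0, hF]

theorem pvState_one (cs : List Char) (hn : 1 ≤ cs.length) :
    pvState cs cs.length 1 =
      (List.replicate cs.length (1 : Int), List.replicate cs.length true) := by
  rw [pvState]
  have hm : cs.length - 1 + 1 = cs.length := by omega
  rw [hm]
  simp only [Prod.mk.injEq]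
  constructor
  · rw [List.eq_replicate_iff]
    refine ⟨by simp, ?_⟩
    intro b hb
    rw [List.mem_map] at hb
    obtain ⟨i, hi, rfl⟩ := hb
    rw [List.mem_range] at hi
    have hl : (pvSub cs i 1).length = 1 := pvSub_length cs i 1 (by omega)
    rw [pvF, if_pos (by omega)]
  · rw [List.eq_replicate_iff]
    refine ⟨by simp, ?_⟩
    intro b hb
    rw [List.mem_map] at hb
    obtain ⟨i, hi, rfl⟩ := hb
    rw [List.mem_range] at hi
    have hl : (pvSub cs i 1).length = 1 := pvSub_length cs i 1 (by omega)
    cases hs : pvSub cs i 1 with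
    | nil => rw [hs] at hl; simp at hl
    | cons a t =>
      rw [hs] at hl
      have ht : t = [] := by
        rw [← List.length_eq_zero_iff]
        simpa using hl
      subst ht
      simp

theorem foldl_steps (cs : List Char) : ∀ (k : Nat), k ≤ cs.length - 1 → 1 ≤ cs.length →
    (List.range' 2 k).foldl (dfsStep cs cs.length)
      (List.replicate cs.length (1 : Int), List.replicate cs.length true) =
      pvState cs cs.length (k + 1)
  | 0, _, h1 => by
    simp only [List.range'_zero, List.foldl_nil]
    exact (pvState_one cs h1).symm
  | k + 1, hk, h1 => by
    rw [List.range'_concat]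
    simp only [List.foldl_append, List.foldl_cons, List.foldl_nil]
    rw [foldl_steps cs k (by omega) h1]
    have he : 2 + 1 * k = k + 2 := by omega
    rw [he]
    have := dfsStep_state cs (k + 2) (by omega) (by omega)
    simpa using this

theorem dfs_eq_pvF (s : String) (h : s.toList ≠ []) : dfs s = pvF s.toList := by
  rw [dfs]
  exact (dfsA_correct s.toList PySem.Dict.empty h (by
    intro k v hk; rw [PySem.Dict.get?_empty] at hk; cases hk)).1

theorem dfs_alt_eq_pvF (s : String) (h : s.toList ≠ []) : dfs_alt s = pvF s.toList := by
  have h1 : 1 ≤ s.toList.length := by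
    cases hs : s.toList with
    | nil => exact absurd hs h
    | cons a t => simp
  rw [dfs_alt]
  rw [foldl_steps s.toList (s.toList.length - 1) (by omega) h1]
  rw [pvState]
  have hm : s.toList.length - (s.toList.length - 1 + 1) + 1 = 1 := by omega
  rw [hm]
  rw [getD_map_range _ _ _ _ (by omega : 0 < 1)]
  have hsub : pvSub s.toList 0 (s.toList.length - 1 + 1) = s.toList := by
    rw [pvSub]
    simp only [List.drop_zero]
    apply List.take_of_length_le
    omega
  rw [hsub]

-- ===== VERDICT (by name: the statement is the Claim_ definition above) =====
theorem dfs_spec : Claim_equal_dfs := by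
  intro s _ hpre
  unfold Spec_dfs
  have h : s.toList ≠ [] := by
    intro hc
    have h2 : s.toList = "".toList := by rw [hc]; decide
    exact hpre (String.toList_inj.mp h2)
  rw [dfs_eq_pvF s h, dfs_alt_eq_pvF s h]
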